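-- pv_equiv track=rewrite | github.com/SamWheating/AdventOfCode | 2024/12/solution.py | num_sides
-- ===== SOURCE A (Python) =====
-- from typing import List, Dict, Tuple, Set
--
-- def num_sides(points: Set[Tuple[int, int]]) -> List[Set[Tuple[int,int]]]:
--     # given a shape defined by a set 1x1 tiles, find the number of edges in its perimiter
--
--     sides: List[Set[Tuple[int,int]]] = []
--
--     # tangent is a length-1 vector perpendicular to an edge
--     # if point is in group but point+tangent is not, then its an edge
--     #
--     # plane is in-line with an edge. If point+plane or point-plane is in an existing group,
--     # then point is also a part of the same edge
--     for tangent, plane in [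
--         ((1,0), (0,1)),
--         ((-1,0), (0,1)),
--         ((0,1), (1,0)),
--         ((0,-1), (1,0)),
--     ]:
--
--         subset: List[Set[Tuple[int,int]]] = []
--         # first find all edges facing in the given direction (length 1)
--         for p in points:
--             if (p[0]+tangent[0], p[1]+tangent[1]) not in points:
--                 subset.append({p})
--
--         # now merge adjacent edges until we can't merge any more
--         while True:
--             merged = False
--             for g1 in subset:
--                 for g2 in subset:
--                     if g1 == g2:
--                         continue
--                     for p in g1:
--                         a = (p[0]+plane[0], p[1]+plane[1])
--                         b = (p[0]-plane[0], p[1]-plane[1])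
--                         if a in g2 or b in g2:
--                             # merge these groups since they're adjacent:
--                             merged = True
--                             subset = [s for s in subset if s != g1 and s != g2]
--                             subset.append(g1 | g2)
--                             break
--                     if merged:
--                         break
--                 if merged:
--                     break
--
--             if not merged:
--                 sides.extend(subset)
--                 break
--
--     return len(sides)
-- ===== SOURCE B (Python) =====
-- def num_sides(points):
--     # Count sides by counting run-ends: for each of the 4 outward directions,
--     # a boundary cell starts no new side unless the next cell along the edge
--     # is not also a boundary cell in the same direction.
--     pts = set(points)
--     total = 0
--     for tangent, plane in [((1, 0), (0, 1)), ((-1, 0), (0, 1)),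
--                            ((0, 1), (1, 0)), ((0, -1), (1, 0))]:
--         boundary = {p for p in pts if (p[0] + tangent[0], p[1] + tangent[1]) not in pts}
--         total += sum(1 for p in boundary
--                      if (p[0] + plane[0], p[1] + plane[1]) not in boundary)
--     return total
-- ===== Notes on version B (the rewrite author's own statement) =====
-- stated objective: faster
-- what changed: Replaces the repeated quadratic merge-adjacent-groups fixpoint with a single pass per direction that counts run-ends of boundary cells (a side = a boundary cell whose successor along the edge is not a boundary cell); Pre_ asks the point list to be duplicate-free, as the parameter is declared a set.
import Mathlib
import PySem

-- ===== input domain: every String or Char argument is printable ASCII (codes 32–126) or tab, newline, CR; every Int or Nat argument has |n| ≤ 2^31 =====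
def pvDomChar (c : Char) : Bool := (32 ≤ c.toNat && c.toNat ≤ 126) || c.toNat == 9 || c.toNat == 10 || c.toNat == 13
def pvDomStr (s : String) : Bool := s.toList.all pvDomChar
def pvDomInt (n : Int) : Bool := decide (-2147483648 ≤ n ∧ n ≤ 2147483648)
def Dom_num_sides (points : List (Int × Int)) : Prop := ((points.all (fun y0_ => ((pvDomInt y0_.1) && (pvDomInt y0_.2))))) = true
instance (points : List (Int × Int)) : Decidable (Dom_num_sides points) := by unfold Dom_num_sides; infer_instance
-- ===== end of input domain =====

-- B replaces A's repeated merge-adjacent-edge-groups fixpoint by a one-pass count of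
-- run-ends of boundary cells per direction (objective: faster, asymptotically).

-- ===== PORT A =====
def pvAdd (p q : Int × Int) : Int × Int := (p.1 + q.1, p.2 + q.2)
def pvSub (p q : Int × Int) : Int × Int := (p.1 - q.1, p.2 - q.2)

-- `for p in g1: if a in g2 or b in g2` — whether some point of g1 is plane-adjacent to g2
def pvAdjacent (g1 g2 : PySem.Set (Int × Int)) (plane : Int × Int) : Bool :=
  g1.any (fun p => PySem.Set.contains g2 (pvAdd p plane) || PySem.Set.contains g2 (pvSub p plane))

-- the first (in scan order) pair g1 ≠ g2 (Python set equality) of adjacent groups, as in A's triple loop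
def pvFindMerge (subset : List (PySem.Set (Int × Int))) (plane : Int × Int) :
    Option (PySem.Set (Int × Int) × PySem.Set (Int × Int)) :=
  subset.findSome? (fun g1 =>
    (subset.find? (fun g2 => !(PySem.Set.equal g1 g2) && pvAdjacent g1 g2 plane)).map (fun g2 => (g1, g2)))

-- A's `while True` merge loop; each merge strictly shortens `subset`, so fuel = initial length suffices
def pvMergeLoop (plane : Int × Int) : Nat → List (PySem.Set (Int × Int)) → List (PySem.Set (Int × Int))
  | 0, subset => subset
  | fuel+1, subset =>
    match pvFindMerge subset plane with
    | none => subset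
    | some (g1, g2) =>
        pvMergeLoop plane fuel
          ((subset.filter (fun s => !(PySem.Set.equal s g1) && !(PySem.Set.equal s g2))) ++ [PySem.Set.union g1 g2])

-- `for p in points: if (p+tangent) not in points: subset.append({p})`
def pvSubset0 (points : List (Int × Int)) (tangent : Int × Int) : List (PySem.Set (Int × Int)) :=
  points.foldl (fun acc p => if !(points.contains (pvAdd p tangent)) then acc ++ [PySem.Set.ofList [p]] else acc) []

def pvDirSides (points : List (Int × Int)) (tangent plane : Int × Int) : List (PySem.Set (Int × Int)) :=
  pvMergeLoop plane (pvSubset0 points tangent).length (pvSubset0 points tangent)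

def num_sides (points : List (Int × Int)) : Int :=
  let sides := ([((1,0),(0,1)), ((-1,0),(0,1)), ((0,1),(1,0)), ((0,-1),(1,0))] :
      List ((Int × Int) × (Int × Int))).foldl
    (fun sides d => sides ++ pvDirSides points d.1 d.2) []
  Int.ofNat sides.length

-- ===== PORT B =====
-- boundary = {p for p in pts if p+tangent not in pts}; count p in boundary with p+plane not in boundary
def pvRunEnds (pts : PySem.Set (Int × Int)) (tangent plane : Int × Int) : Nat :=
  let boundary : PySem.Set (Int × Int) :=
    pts.filter (fun p => !(PySem.Set.contains pts (pvAdd p tangent)))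
  boundary.countP (fun p => !(PySem.Set.contains boundary (pvAdd p plane)))

def num_sides_alt (points : List (Int × Int)) : Int :=
  let pts : PySem.Set (Int × Int) := PySem.Set.ofList points
  Int.ofNat (([((1,0),(0,1)), ((-1,0),(0,1)), ((0,1),(1,0)), ((0,-1),(1,0))] :
      List ((Int × Int) × (Int × Int))).foldl
    (fun total d => total + pvRunEnds pts d.1 d.2) 0)

-- ===== PRECONDITION & SPEC =====
-- Pre_ excludes lists with duplicate points: A's parameter is declared a set, and on a duplicated
-- list A keeps each copy as a separate edge group that never merges with its twin, while B
-- deduplicates as a set would.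
def Pre_num_sides (points : List (Int × Int)) : Prop := points.Nodup
instance (points : List (Int × Int)) : Decidable (Pre_num_sides points) := by unfold Pre_num_sides; infer_instance
def pvWitness_num_sides : (List (Int × Int)) := [(0, 0), (0, 1), (1, 1)]

def Spec_num_sides (points : List (Int × Int)) (out : Int) : Prop := out = num_sides_alt points
instance (points : List (Int × Int)) (out : Int) : Decidable (Spec_num_sides points out) := by unfold Spec_num_sides; infer_instance

-- ===== CLAIM (what is proved, stated in full; the proofs are below) =====
def Claim_equal_num_sides : Prop := ∀ (points : List (Int × Int)), Dom_num_sides points → Pre_num_sides points → Spec_num_sides points (num_sides points)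

-- ===== LEMMAS AND PROOFS =====

-- the i-th point of the line through a in direction pl
def pvPt (a pl : Int × Int) (i : Int) : Int × Int := (a.1 + i * pl.1, a.2 + i * pl.2)

def pvChainMem (a pl : Int × Int) (k : Int) (x : Int × Int) : Prop :=
  ∃ i : Int, 0 ≤ i ∧ i ≤ k ∧ x = pvPt a pl i

def pvIsChain (pl : Int × Int) (g : List (Int × Int)) : Prop :=
  ∃ a k, 0 ≤ k ∧ ∀ x, x ∈ g ↔ pvChainMem a pl k x

-- loop invariant of A's merge loop: groups are nodup chains, pairwise disjoint, covering Bl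
def pvInv (pl : Int × Int) (Bl : List (Int × Int)) (gs : List (List (Int × Int))) : Prop :=
  (∀ g ∈ gs, g.Nodup ∧ pvIsChain pl g) ∧
  gs.Pairwise List.Disjoint ∧
  (∀ x, x ∈ gs.flatten ↔ x ∈ Bl)

theorem pvPt_inj (a pl : Int × Int) (hpl : pl ≠ (0,0)) {i j : Int}
    (h : pvPt a pl i = pvPt a pl j) : i = j := by
  simp only [pvPt, Prod.mk.injEq] at h
  by_cases hp1 : pl.1 = 0
  · have hp2 : pl.2 ≠ 0 := fun h2' => hpl (by rw [Prod.ext_iff]; exact ⟨hp1, h2'⟩)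
    have : i * pl.2 = j * pl.2 := by omega
    exact mul_right_cancel₀ hp2 this
  · have : i * pl.1 = j * pl.1 := by omega
    exact mul_right_cancel₀ hp1 this

theorem pvAdd_pvPt (a pl : Int × Int) (i : Int) : pvAdd (pvPt a pl i) pl = pvPt a pl (i + 1) := by
  simp [pvAdd, pvPt]; constructor <;> ring

theorem pvPt_pvPt (a pl : Int × Int) (d j : Int) : pvPt (pvPt a pl d) pl j = pvPt a pl (d + j) := by
  simp [pvPt]; constructor <;> ring

theorem pvChain_join (pl : Int × Int) (_hpl : pl ≠ (0,0)) {g1 g2 : List (Int × Int)} {a b : Int × Int} {k m : Int}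
    (h1 : ∀ x, x ∈ g1 ↔ pvChainMem a pl k x) (h2 : ∀ x, x ∈ g2 ↔ pvChainMem b pl m x)
    (hk : 0 ≤ k) (hm : 0 ≤ m)
    (hdisj : List.Disjoint g1 g2)
    {p : Int × Int} (hp : p ∈ g1) (hadj : pvAdd p pl ∈ g2) :
    ∀ x, (x ∈ g1 ∨ x ∈ g2) ↔ pvChainMem a pl (k + m + 1) x := by
  obtain ⟨i, hi0, hik, rfl⟩ := (h1 p).1 hp
  rw [pvAdd_pvPt] at hadj
  obtain ⟨j, hj0, hjm, hbj⟩ := (h2 _).1 hadj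
  -- b = pvPt a pl (i+1-j)
  have hb : b = pvPt a pl (i + 1 - j) := by
    have h1' := congrArg Prod.fst hbj
    have h2' := congrArg Prod.snd hbj
    simp only [pvPt] at h1' h2' ⊢
    rw [Prod.ext_iff]
    exact ⟨by linarith [h1'], by linarith [h2']⟩
  set d : Int := i + 1 - j with hd
  -- no index collision between the two chains
  have hne : ∀ i' j', 0 ≤ i' → i' ≤ k → 0 ≤ j' → j' ≤ m → d + j' ≠ i' := by
    intro i' j' h1' h2' h3' h4' heq
    have hx1 : pvPt a pl i' ∈ g1 := (h1 _).2 ⟨i', h1', h2', rfl⟩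
    have hx2 : pvPt a pl i' ∈ g2 := by
      refine (h2 _).2 ⟨j', h3', h4', ?_⟩
      rw [hb, pvPt_pvPt, heq]
    exact hdisj hx1 hx2
  have hik' : i = k := by
    by_contra hc
    exact hne (i + 1) j (by omega) (by omega) hj0 hjm (by omega)
  have hdk : d = k + 1 := by
    rcases lt_trichotomy d 0 with hlt | heq0 | hgt
    · exact absurd (hne 0 (-d) le_rfl hk (by omega) (by omega) (by omega)) (by simp)
    · exact absurd (hne 0 0 le_rfl hk le_rfl hm (by omega)) (by simp)
    · by_cases hdl : d ≤ k
      · exact absurd (hne d 0 (by omega) hdl le_rfl hm (by omega)) (by simp)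
      · omega
  -- union membership
  intro x
  constructor
  · rintro (hx | hx)
    · obtain ⟨i', h0, hk', rfl⟩ := (h1 x).1 hx
      exact ⟨i', h0, by omega, rfl⟩
    · obtain ⟨j', h0, hm', rfl⟩ := (h2 x).1 hx
      refine ⟨d + j', by omega, by omega, ?_⟩
      rw [hb, pvPt_pvPt]
  · rintro ⟨i', h0, htop, rfl⟩
    by_cases hle : i' ≤ k
    · exact Or.inl ((h1 _).2 ⟨i', h0, hle, rfl⟩)
    · refine Or.inr ((h2 _).2 ⟨i' - d, by omega, by omega, ?_⟩)
      rw [hb, pvPt_pvPt]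
      congr 1
      omega


theorem pvFindMerge_some {subset : List (PySem.Set (Int × Int))} {pl : Int × Int}
    {g1 g2 : PySem.Set (Int × Int)} (h : pvFindMerge subset pl = some (g1, g2)) :
    g1 ∈ subset ∧ g2 ∈ subset ∧ PySem.Set.equal g1 g2 = false ∧
      ∃ p ∈ g1, pvAdd p pl ∈ g2 ∨ pvSub p pl ∈ g2 := by
  obtain ⟨a, ha, hfa⟩ := List.exists_of_findSome?_eq_some h
  rcases Option.map_eq_some_iff.1 hfa with ⟨g2', hfind, heq⟩
  obtain ⟨rfl, rfl⟩ : a = g1 ∧ g2' = g2 := Prod.mk.injEq .. ▸ heq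
  have hmem := List.mem_of_find?_eq_some hfind
  have hpred := List.find?_some hfind
  rw [Bool.and_eq_true, Bool.not_eq_true'] at hpred
  refine ⟨ha, hmem, hpred.1, ?_⟩
  rcases List.any_eq_true.1 hpred.2 with ⟨p, hp, hor⟩
  rw [Bool.or_eq_true] at hor
  rcases hor with hc | hc
  · exact ⟨p, hp, Or.inl ((PySem.Set.contains_iff _ _).1 hc)⟩
  · exact ⟨p, hp, Or.inr ((PySem.Set.contains_iff _ _).1 hc)⟩


theorem pvFindMerge_none {subset : List (PySem.Set (Int × Int))} {pl : Int × Int}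
    (h : pvFindMerge subset pl = none) :
    ∀ g1 ∈ subset, ∀ g2 ∈ subset,
      PySem.Set.equal g1 g2 = true ∨ ∀ p ∈ g1, pvAdd p pl ∉ g2 ∧ pvSub p pl ∉ g2 := by
  intro g1 h1 g2 h2
  have := List.findSome?_eq_none_iff.1 h g1 h1
  rcases Option.map_eq_none_iff.1 this with hfind
  have := List.find?_eq_none.1 hfind g2 h2
  rw [Bool.and_eq_true, Bool.not_eq_true'] at this
  by_cases heq : PySem.Set.equal g1 g2 = true
  · exact Or.inl heq
  · right
    have hadj : pvAdjacent g1 g2 pl ≠ true := fun hh => this ⟨Bool.not_eq_true _ ▸ by simpa using heq, hh⟩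
    intro p hp
    simp only [pvAdjacent, Ne, List.any_eq_true, not_exists, Bool.or_eq_true,
      PySem.Set.contains_iff] at hadj
    push Not at hadj
    exact hadj p hp


theorem pvFilter_two_le {α : Type} (p : α → Bool) {l : List α} {a b : α}
    (ha : a ∈ l) (hb : b ∈ l) (hne : a ≠ b) (hpa : p a = false) (hpb : p b = false) :
    (l.filter p).length + 2 ≤ l.length := by
  induction l with
  | nil => simp at ha
  | cons x xs ih =>
    rcases List.mem_cons.1 ha with rfl | ha'
    · have hbx : b ∈ xs := by rcases List.mem_cons.1 hb with rfl | h; exact absurd rfl hne; exact h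
      have hlt : (xs.filter p).length < xs.length :=
        (List.length_filter_lt_length_iff_exists (l := xs) (p := p)).2 ⟨b, hbx, by simp [hpb]⟩
      simp only [List.filter_cons, hpa, List.length_cons, Bool.false_eq_true, ite_false]
      omega
    · rcases List.mem_cons.1 hb with rfl | hb'
      · have hlt : (xs.filter p).length < xs.length :=
          (List.length_filter_lt_length_iff_exists (l := xs) (p := p)).2 ⟨a, ha', by simp [hpa]⟩
        simp only [List.filter_cons, hpb, List.length_cons, Bool.false_eq_true, ite_false]
        omega
      · have := ih ha' hb'
        simp only [List.filter_cons, List.length_cons]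
        split
        · simp only [List.length_cons]; omega
        · omega


theorem pvInv_step {pl : Int × Int} (hpl : pl ≠ (0,0)) {Bl : List (Int × Int)}
    {gs : List (List (Int × Int))} {g1 g2 : PySem.Set (Int × Int)}
    (hInv : pvInv pl Bl gs) (h : pvFindMerge gs pl = some (g1, g2)) :
    pvInv pl Bl ((gs.filter (fun s => !(PySem.Set.equal s g1) && !(PySem.Set.equal s g2))) ++ [PySem.Set.union g1 g2]) ∧
    ((gs.filter (fun s => !(PySem.Set.equal s g1) && !(PySem.Set.equal s g2))) ++ [PySem.Set.union g1 g2]).length + 1 ≤ gs.length := by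
  obtain ⟨hg1, hg2, hneq, p, hp, hadj⟩ := pvFindMerge_some h
  obtain ⟨hInv1, hInv2, hInv3⟩ := hInv
  have hsymm : Symmetric (List.Disjoint (α := Int × Int)) := by
    intro u v hd x hx hx'
    exact hd hx' hx
  have hdisj_all : ∀ g ∈ gs, ∀ h ∈ gs, g ≠ h → List.Disjoint g h :=
    fun g hg h hh hne => List.Pairwise.forall hsymm hInv2 hg hh hne
  have hg1g2 : g1 ≠ g2 := fun hcontra => by
    rw [hcontra] at hneq
    have := (PySem.Set.equal_iff g2 g2).2 (fun x => Iff.rfl)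
    rw [this] at hneq; exact Bool.true_eq_false.mp hneq |>.elim
  have hdisj12 : List.Disjoint g1 g2 := hdisj_all g1 hg1 g2 hg2 hg1g2
  obtain ⟨hnd1, a, k, hk, hch1⟩ := hInv1 g1 hg1
  obtain ⟨hnd2, b, m, hm, hch2⟩ := hInv1 g2 hg2
  -- union is a chain
  have hu : ∀ x, x ∈ PySem.Set.union g1 g2 ↔ (x ∈ g1 ∨ x ∈ g2) := fun x => PySem.Set.mem_union ..
  have huchain : pvIsChain pl (PySem.Set.union g1 g2) := by
    rcases hadj with hadd | hsub
    · exact ⟨a, k + m + 1, by omega, fun x => (hu x).trans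
        (pvChain_join pl hpl hch1 hch2 hk hm hdisj12 hp hadd x)⟩
    · have hq : pvSub p pl ∈ g2 := hsub
      have hpq : pvAdd (pvSub p pl) pl = p := by simp [pvAdd, pvSub]
      have hp' : pvAdd (pvSub p pl) pl ∈ g1 := by rw [hpq]; exact hp
      have := pvChain_join pl hpl hch2 hch1 hm hk (fun x hx hx' => hdisj12 hx' hx) hq hp'
      exact ⟨b, m + k + 1, by omega, fun x => (hu x).trans ((or_comm).trans (this x))⟩
  -- a survivor of the filter is value-distinct from g1 and g2
  have hkeep : ∀ s, s ∈ gs.filter (fun s => !(PySem.Set.equal s g1) && !(PySem.Set.equal s g2)) →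
      s ∈ gs ∧ s ≠ g1 ∧ s ≠ g2 ∧ PySem.Set.equal s g1 = false ∧ PySem.Set.equal s g2 = false := by
    intro s hs
    rcases List.mem_filter.1 hs with ⟨hsg, hcond⟩
    rw [Bool.and_eq_true, Bool.not_eq_true', Bool.not_eq_true'] at hcond
    refine ⟨hsg, ?_, ?_, hcond.1, hcond.2⟩
    · rintro rfl; rw [(PySem.Set.equal_iff s s).2 (fun x => Iff.rfl)] at hcond; exact (Bool.true_eq_false.mp hcond.1).elim
    · rintro rfl; rw [(PySem.Set.equal_iff s s).2 (fun x => Iff.rfl)] at hcond; exact (Bool.true_eq_false.mp hcond.2).elim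
  constructor
  · refine ⟨?_, ?_, ?_⟩
    · intro g hg
      rcases List.mem_append.1 hg with hgf | hgu
      · exact hInv1 g (hkeep g hgf).1
      · rw [List.mem_singleton.1 hgu]
        exact ⟨PySem.Set.nodup_union g1 g2 hnd1, huchain⟩
    · rw [List.pairwise_append]
      refine ⟨List.Pairwise.filter _ hInv2, List.pairwise_singleton _ _, ?_⟩
      intro s hs u hu'
      rw [List.mem_singleton.1 hu']
      obtain ⟨hsg, hne1, hne2, _, _⟩ := hkeep s hs
      intro x hx hx'
      rcases (hu x).1 hx' with h1x | h2x
      · exact hdisj_all s hsg g1 hg1 hne1 hx h1x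
      · exact hdisj_all s hsg g2 hg2 hne2 hx h2x
    · intro x
      rw [← hInv3 x]
      simp only [List.mem_flatten, List.mem_append, List.mem_singleton]
      constructor
      · rintro ⟨g, hg | hg, hx⟩
        · exact ⟨g, (hkeep g hg).1, hx⟩
        · subst hg
          rcases (hu x).1 hx with h1x | h2x
          · exact ⟨g1, hg1, h1x⟩
          · exact ⟨g2, hg2, h2x⟩
      · rintro ⟨g, hg, hx⟩
        by_cases he1 : PySem.Set.equal g g1 = true
        · exact ⟨PySem.Set.union g1 g2, Or.inr rfl, (hu x).2 (Or.inl (((PySem.Set.equal_iff g g1).1 he1 x).1 hx))⟩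
        by_cases he2 : PySem.Set.equal g g2 = true
        · exact ⟨PySem.Set.union g1 g2, Or.inr rfl, (hu x).2 (Or.inr (((PySem.Set.equal_iff g g2).1 he2 x).1 hx))⟩
        · refine ⟨g, Or.inl (List.mem_filter.2 ⟨hg, ?_⟩), hx⟩
          rw [Bool.and_eq_true, Bool.not_eq_true', Bool.not_eq_true']
          exact ⟨Bool.not_eq_true _ ▸ he1, Bool.not_eq_true _ ▸ he2⟩
  · have hrefl1 : (fun s => !(PySem.Set.equal s g1) && !(PySem.Set.equal s g2)) g1 = false := by
      simp [(PySem.Set.equal_iff g1 g1).2 (fun x => Iff.rfl)]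
    have hrefl2 : (fun s => !(PySem.Set.equal s g1) && !(PySem.Set.equal s g2)) g2 = false := by
      simp [(PySem.Set.equal_iff g2 g2).2 (fun x => Iff.rfl)]
    have := pvFilter_two_le (fun s => !(PySem.Set.equal s g1) && !(PySem.Set.equal s g2)) hg1 hg2 hg1g2 hrefl1 hrefl2
    simp only [List.length_append, List.length_singleton]
    omega


theorem pvFixpoint_count {pl : Int × Int} (hpl : pl ≠ (0,0)) {Bl : List (Int × Int)}
    (hB : Bl.Nodup) {gs : List (List (Int × Int))}
    (hInv : pvInv pl Bl gs) (hnone : pvFindMerge gs pl = none) :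
    gs.length = (Bl.filter (fun p => !(Bl.contains (pvAdd p pl)))).length := by
  obtain ⟨hInv1, hInv2, hInv3⟩ := hInv
  set P : (Int × Int) → Bool := fun p => !(Bl.contains (pvAdd p pl)) with hP
  have hsubBl : ∀ g ∈ gs, ∀ x ∈ g, x ∈ Bl := fun g hg x hx =>
    (hInv3 x).1 (List.mem_flatten.2 ⟨g, hg, hx⟩)
  -- each group keeps exactly one run-end
  have hone : ∀ g ∈ gs, (g.filter P).length = 1 := by
    intro g hg
    obtain ⟨hnd, a, k, hk, hch⟩ := hInv1 g hg
    have htop : pvPt a pl k ∈ g := (hch _).2 ⟨k, hk, le_rfl, rfl⟩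
    have hmem : ∀ x, x ∈ g.filter P ↔ x = pvPt a pl k := by
      intro x
      rw [List.mem_filter]
      constructor
      · rintro ⟨hxg, hPx⟩
        obtain ⟨i, hi0, hik, rfl⟩ := (hch x).1 hxg
        by_cases hlt : i < k
        · exfalso
          have hnext : pvPt a pl (i + 1) ∈ g := (hch _).2 ⟨i + 1, by omega, by omega, rfl⟩
          have : pvAdd (pvPt a pl i) pl ∈ Bl := by
            rw [pvAdd_pvPt]; exact hsubBl g hg _ hnext
          rw [hP, Bool.not_eq_true', ← Bool.not_eq_true] at hPx
          exact hPx (List.contains_iff_mem.2 this)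
        · have : i = k := by omega
          rw [this]
      · rintro rfl
        refine ⟨htop, ?_⟩
        rw [hP, Bool.not_eq_true']
        rw [← Bool.not_eq_true]
        intro hc
        have hinBl : pvAdd (pvPt a pl k) pl ∈ Bl := List.contains_iff_mem.1 hc
        rw [pvAdd_pvPt] at hinBl
        obtain ⟨h', hh', hzh⟩ := List.mem_flatten.1 ((hInv3 _).2 hinBl)
        rcases pvFindMerge_none hnone g hg h' hh' with heq | hnadj
        · have : pvPt a pl (k + 1) ∈ g := ((PySem.Set.equal_iff g h').1 heq _).2 hzh
          obtain ⟨i, hi0, hik, hieq⟩ := (hch _).1 this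
          have := pvPt_inj a pl hpl hieq.symm
          omega
        · have := (hnadj _ htop).1
          rw [pvAdd_pvPt] at this
          exact this hzh
    have hfnd : (g.filter P).Nodup := hnd.filter P
    have : (g.filter P).Perm [pvPt a pl k] := by
      refine (List.perm_ext_iff_of_nodup hfnd (List.nodup_singleton _)).2 fun x => ?_
      rw [hmem x, List.mem_singleton]
    simpa using this.length_eq
  have hflat_nodup : gs.flatten.Nodup := by
    rw [List.nodup_flatten]
    exact ⟨fun l hl => (hInv1 l hl).1, hInv2⟩
  have hperm : Bl.Perm gs.flatten := (List.perm_ext_iff_of_nodup hB hflat_nodup).2 fun x => (hInv3 x).symm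
  calc gs.length = (gs.map (fun g => (g.filter P).length)).sum := by
        rw [List.map_congr_left (fun g hg => hone g hg)]
        simp [List.map_const']
    _ = ((gs.map (List.filter P)).flatten).length := by
        rw [List.length_flatten, List.map_map]; rfl
    _ = (gs.flatten.filter P).length := by rw [List.filter_flatten]
    _ = (Bl.filter P).length := ((hperm.filter P).length_eq).symm

theorem pvMergeLoop_count {pl : Int × Int} (hpl : pl ≠ (0,0)) {Bl : List (Int × Int)}
    (hB : Bl.Nodup) :
    ∀ (fuel : Nat) (gs : List (List (Int × Int))), gs.length ≤ fuel → pvInv pl Bl gs →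
      (pvMergeLoop pl fuel gs).length = (Bl.filter (fun p => !(Bl.contains (pvAdd p pl)))).length := by
  intro fuel
  induction fuel with
  | zero =>
    intro gs hlen hInv
    have hnil : gs = [] := List.eq_nil_of_length_eq_zero (by omega)
    subst hnil
    have hBnil : Bl = [] := by
      rw [List.eq_nil_iff_forall_not_mem]
      intro x hx
      have := (hInv.2.2 x).2 hx
      simp at this
    simp [pvMergeLoop, hBnil]
  | succ n ih =>
    intro gs hlen hInv
    rw [pvMergeLoop]
    cases hfm : pvFindMerge gs pl with
    | none => exact pvFixpoint_count hpl hB hInv hfm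
    | some pr =>
      obtain ⟨g1, g2⟩ := pr
      obtain ⟨hInv', hlen'⟩ := pvInv_step hpl hInv hfm
      exact ih _ (by omega) hInv'

theorem pvInv_init (pl : Int × Int) {Bl : List (Int × Int)} (hB : Bl.Nodup) :
    pvInv pl Bl (Bl.map (fun p => [p])) := by
  refine ⟨?_, ?_, ?_⟩
  · rintro g hg
    rcases List.mem_map.1 hg with ⟨p, hp, rfl⟩
    refine ⟨List.nodup_singleton p, p, 0, le_rfl, fun x => ?_⟩
    simp only [List.mem_singleton, pvChainMem]
    constructor
    · rintro rfl; exact ⟨0, le_rfl, le_rfl, by simp [pvPt]⟩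
    · rintro ⟨i, h0, h1, rfl⟩; simp [pvPt, show i = 0 by omega]
  · rw [List.pairwise_map]
    refine hB.pairwise_of_forall_ne fun p hp q hq hne => ?_
    intro x hx hx'
    simp only [List.mem_singleton] at hx hx'
    exact hne (hx ▸ hx' ▸ rfl)
  · intro x
    simp only [List.mem_flatten, List.mem_map]
    constructor
    · rintro ⟨g, ⟨p, hp, rfl⟩, hx⟩
      rw [List.mem_singleton.1 hx]; exact hp
    · intro hx; exact ⟨[x], ⟨x, hx, rfl⟩, List.mem_singleton.2 rfl⟩


theorem pvDir_eq (points : List (Int × Int)) (t pl : Int × Int) (hpl : pl ≠ (0,0))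
    (hnd : points.Nodup) :
    (pvDirSides points t pl).length = pvRunEnds (PySem.Set.ofList points) t pl := by
  rw [pvDirSides, pvRunEnds, pvSubset0]
  simp only [PySem.Set.ofList_eq_self_of_nodup points hnd]
  rw [PySem.List.foldl_append_if]
  simp only [List.nil_append, PySem.Set.contains_eq_listContains]
  set Bl : List (Int × Int) := points.filter (fun p => !(points.contains (pvAdd p t))) with hBl
  have hBnd : Bl.Nodup := hnd.filter _
  have hmap : Bl.map (fun p => PySem.Set.ofList [p]) = Bl.map (fun p => [p]) :=
    List.map_congr_left fun p _ => PySem.Set.ofList_eq_self_of_nodup [p] (List.nodup_singleton p)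
  rw [hmap, List.countP_eq_length_filter]
  have := pvMergeLoop_count (Bl := Bl) hpl hBnd ((Bl.map (fun p => [p])).length)
    (Bl.map (fun p => [p])) le_rfl (pvInv_init pl hBnd)
  simpa using this

-- ===== VERDICT (by name: the statement is the Claim_ definition above) =====
theorem num_sides_spec : Claim_equal_num_sides := by
  intro points _ hpre
  unfold Spec_num_sides num_sides num_sides_alt
  simp only [List.foldl_cons, List.foldl_nil, List.length_append, List.nil_append]
  rw [pvDir_eq points (1,0) (0,1) (by decide) hpre,
      pvDir_eq points (-1,0) (0,1) (by decide) hpre,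
      pvDir_eq points (0,1) (1,0) (by decide) hpre,
      pvDir_eq points (0,-1) (1,0) (by decide) hpre]
  congr 1
  omega
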